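-- pv_equiv track=rewrite | github.com/gh-arnab21/BDH_interpretability | scripts/precompute_monosemanticity.py | _find_word_in_sentence
-- ===== SOURCE A (Python) =====
-- from typing import Dict, List, Any, Tuple, Optional
--
-- def _split_sentence_to_words(sentence: str) -> List[Tuple[str, int, int]]:
--     """
--     Split a sentence into words with their byte-range positions.
--     Returns: [(word, byte_start, byte_end), ...]
--     """
--     words: List[Tuple[str, int, int]] = []
--     byte_pos = 0
--     for word in sentence.split(" "):
--         word_bytes = len(word.encode("utf-8"))
--         words.append((word, byte_pos, byte_pos + word_bytes))
--         byte_pos += word_bytes + 1  # +1 for the space byte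
--     return words
--
-- def _find_word_in_sentence(sentence: str, target_word: str) -> Optional[Tuple[int, int]]:
--     """
--     Find the byte range of a target word in a sentence.
--     Returns (byte_start, byte_end) or None if not found.
--     Handles French articles: l', d'.
--     """
--     words_with_positions = _split_sentence_to_words(sentence.lower())
--     target_lower = target_word.lower()
--
--     for word, byte_start, byte_end in words_with_positions:
--         clean_word = word.strip(".,;:!?'\"()").lower()
--         if clean_word == target_lower:
--             return (byte_start, byte_end)
--         if clean_word.startswith("l'") and clean_word[2:] == target_lower:
--             prefix_bytes = len("l'".encode("utf-8"))
--             return (byte_start + prefix_bytes, byte_end)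
--         if clean_word.startswith("d'") and clean_word[2:] == target_lower:
--             prefix_bytes = len("d'".encode("utf-8"))
--             return (byte_start + prefix_bytes, byte_end)
--     return None
-- ===== SOURCE B (Python) =====
-- def _find_word_in_sentence(sentence, target_word):
--     """Character-level state machine (no split, no triple table): pre-build a dict of the three
--     acceptable cleaned forms -> prefix offset, then stream the lowered sentence once, cutting
--     tokens at spaces and answering each token with a single dict lookup."""
--     t = target_word.lower()
--     offsets = {t: 0, "l'" + t: 2, "d'" + t: 2}
--     start = pos = 0
--     buf = []
--     for ch in sentence.lower() + " ":
--         if ch == " ":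
--             clean = "".join(buf).strip(".,;:!?'\"()").lower()
--             off = offsets.get(clean)
--             if off is not None:
--                 return (start + off, pos)
--             pos += 1
--             start = pos
--             buf = []
--         else:
--             buf.append(ch)
--             pos += len(ch.encode("utf-8"))
--     return None
-- ===== Notes on version B (the rewrite author's own statement) =====
-- stated objective: alternative
-- what changed: B drops A's split()-then-table-then-branch-chain design entirely: it precomputes a dict mapping the three acceptable cleaned token forms (target, l'+target, d'+target) to their prefix byte offset, then runs a single character-level state machine over the lowered sentence plus a sentinel space, cutting tokens at spaces and deciding each token with one dict lookup instead of A's equality/startswith/slice branch chain.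
import Mathlib
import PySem

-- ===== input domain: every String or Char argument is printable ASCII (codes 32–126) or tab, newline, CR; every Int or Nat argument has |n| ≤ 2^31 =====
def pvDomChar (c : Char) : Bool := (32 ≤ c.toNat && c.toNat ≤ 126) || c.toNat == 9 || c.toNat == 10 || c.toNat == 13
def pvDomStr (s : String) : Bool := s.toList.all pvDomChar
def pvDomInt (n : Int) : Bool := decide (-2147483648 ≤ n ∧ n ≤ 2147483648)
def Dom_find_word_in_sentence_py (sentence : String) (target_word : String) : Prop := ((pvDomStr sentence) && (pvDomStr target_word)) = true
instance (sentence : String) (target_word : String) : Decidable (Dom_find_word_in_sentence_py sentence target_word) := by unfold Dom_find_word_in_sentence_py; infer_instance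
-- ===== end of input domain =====

-- B replaces A's two-stage split/triple-table scan by a one-shot character-level state machine
-- with a precomputed dict of acceptable cleaned forms; objective: alternative (same value everywhere).

-- ===== PORT A =====
-- Ported on the PySem.Chars layer. On the ASCII domain len(word.encode("utf-8")) equals the
-- character count, ported as PySem.Chars.len (exact on Dom).
-- helper _split_sentence_to_words: builds [(word, byte_start, byte_end), ...] with a foldl.
def pvSplitWordsA (sentence : List Char) : List (List Char × Int × Int) :=
  ((PySem.Chars.splitOn sentence [' ']).foldl
    (fun (st : List (List Char × Int × Int) × Int) w =>
      let word_bytes : Int := (PySem.Chars.len w : Int)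
      (st.1 ++ [(w, st.2, st.2 + word_bytes)], st.2 + word_bytes + 1))
    ([], 0)).1

-- the scan loop of _find_word_in_sentence, branch for branch
def pvFindLoopA (target_lower : List Char) : List (List Char × Int × Int) → Option (Int × Int)
  | [] => none
  | (word, byte_start, byte_end) :: rest =>
    let clean_word := PySem.Chars.lower (PySem.Chars.stripChars word ".,;:!?'\"()".toList)
    if clean_word == target_lower then some (byte_start, byte_end)
    else if PySem.Chars.startswith clean_word "l'".toList &&
            (PySem.Chars.slice clean_word (some 2) none == target_lower) then
      let prefix_bytes : Int := (PySem.Chars.len "l'".toList : Int)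
      some (byte_start + prefix_bytes, byte_end)
    else if PySem.Chars.startswith clean_word "d'".toList &&
            (PySem.Chars.slice clean_word (some 2) none == target_lower) then
      let prefix_bytes : Int := (PySem.Chars.len "d'".toList : Int)
      some (byte_start + prefix_bytes, byte_end)
    else pvFindLoopA target_lower rest

def find_word_in_sentence_py (sentence : String) (target_word : String) : Option (Int × Int) :=
  pvFindLoopA (PySem.Chars.lower target_word.toList)
    (pvSplitWordsA (PySem.Chars.lower sentence.toList))

-- ===== PORT B =====
-- B: stream the lowered sentence plus a sentinel space once, cutting tokens at spaces;
-- each finished token is answered by one lookup in the precomputed offsets dict.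
-- pos += len(ch.encode("utf-8")) is ported as pos + 1: exact on the ASCII domain (the same
-- byte≈char convention port A uses for word_bytes).
def pvScanB (offsets : PySem.Dict (List Char) Int) : List Char → Int → Int → List Char → Option (Int × Int)
  | [], _, _, _ => none
  | ch :: cs, start, pos, buf =>
    if ch == ' ' then
      let clean := PySem.Chars.lower (PySem.Chars.stripChars buf ".,;:!?'\"()".toList)
      match offsets.get? clean with
      | some off => some (start + off, pos)
      | none => pvScanB offsets cs (pos + 1) (pos + 1) []
    else pvScanB offsets cs start (pos + 1) (buf ++ [ch])

def find_word_in_sentence_py_alt (sentence : String) (target_word : String) : Option (Int × Int) :=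
  let t := PySem.Chars.lower target_word.toList
  let offsets := ((PySem.Dict.empty.insert t (0 : Int)).insert ("l'".toList ++ t) 2).insert
    ("d'".toList ++ t) 2
  pvScanB offsets (PySem.Chars.lower sentence.toList ++ [' ']) 0 0 []

-- ===== PRECONDITION & SPEC =====
def Spec_find_word_in_sentence_py (sentence : String) (target_word : String) (out : Option (Int × Int)) : Prop := out = find_word_in_sentence_py_alt sentence target_word
instance (sentence : String) (target_word : String) (out : Option (Int × Int)) : Decidable (Spec_find_word_in_sentence_py sentence target_word out) := by unfold Spec_find_word_in_sentence_py; infer_instance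

-- ===== CLAIM (what is proved, stated in full; the proofs are below) =====
def Claim_equal_find_word_in_sentence_py : Prop := ∀ (sentence : String) (target_word : String), Dom_find_word_in_sentence_py sentence target_word → Spec_find_word_in_sentence_py sentence target_word (find_word_in_sentence_py sentence target_word)

-- ===== LEMMAS AND PROOFS =====

-- simple structural recursion equal to s.split(" ") for the single-space separator
def pvMySplit : List Char → List (List Char)
  | [] => [[]]
  | c :: rest => if c = ' ' then [] :: pvMySplit rest else (pvMySplit rest).modifyHead (c :: ·)

theorem pvMySplit_ne_nil (s : List Char) : pvMySplit s ≠ [] := by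
  induction s with
  | nil => simp [pvMySplit]
  | cons c rest ih =>
    simp only [pvMySplit]
    split
    · simp
    · cases h : pvMySplit rest with
      | nil => exact absurd h ih
      | cons w ws => simp []

theorem pvGo_eq (s : List Char) : ∀ (fuel : Nat), s.length < fuel →
    ∀ (cur : List Char) (acc : List (List Char)),
    PySem.Chars.splitOn.go [' '] fuel s cur acc =
      acc.reverse ++ (pvMySplit s).modifyHead (cur.reverse ++ ·) := by
  induction s with
  | nil =>
    intro fuel hf cur acc
    obtain ⟨f, rfl⟩ := Nat.exists_eq_succ_of_ne_zero (by omega : fuel ≠ 0)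
    simp [PySem.Chars.splitOn.go, pvMySplit]
  | cons c rest ih =>
    intro fuel hf cur acc
    obtain ⟨f, rfl⟩ := Nat.exists_eq_succ_of_ne_zero (by omega : fuel ≠ 0)
    by_cases hc : c = ' '
    · subst hc
      have hstep : PySem.Chars.splitOn.go [' '] (f + 1) (' ' :: rest) cur acc =
          PySem.Chars.splitOn.go [' '] f rest [] (cur.reverse :: acc) := by
        simp [PySem.Chars.splitOn.go, List.isPrefixOf]
      rw [hstep, ih f (by simpa using hf) [] (cur.reverse :: acc)]
      simp only [pvMySplit]
      cases h : pvMySplit rest with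
      | nil => exact absurd h (pvMySplit_ne_nil rest)
      | cons w ws => simp [List.modifyHead]
    · have hstep : PySem.Chars.splitOn.go [' '] (f + 1) (c :: rest) cur acc =
          PySem.Chars.splitOn.go [' '] f rest (c :: cur) acc := by
        simp [PySem.Chars.splitOn.go, List.isPrefixOf]
        intro hcontra
        exact absurd hcontra.symm hc
      rw [hstep, ih f (by simpa using hf) (c :: cur) acc]
      simp only [pvMySplit, if_neg hc]
      cases h : pvMySplit rest with
      | nil => exact absurd h (pvMySplit_ne_nil rest)
      | cons w ws => simp [List.modifyHead]

theorem pvSplitOn_space (s : List Char) : PySem.Chars.splitOn s [' '] = pvMySplit s := by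
  have h := pvGo_eq s (s.length + 1) (by omega) [] []
  cases hs : pvMySplit s with
  | nil => exact absurd hs (pvMySplit_ne_nil s)
  | cons w ws =>
    rw [PySem.Chars.splitOn, h, hs]
    simp [List.modifyHead]

-- the triples list A's foldl builds, described structurally
def pvTriples : List (List Char) → Int → List (List Char × Int × Int)
  | [], _ => []
  | w :: rest, pos =>
    (w, pos, pos + (PySem.Chars.len w : Int)) ::
      pvTriples rest (pos + (PySem.Chars.len w : Int) + 1)

theorem pvFold_eq_triples (ws : List (List Char)) (acc : List (List Char × Int × Int)) (pos : Int) :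
    (ws.foldl
      (fun (st : List (List Char × Int × Int) × Int) w =>
        let word_bytes : Int := (PySem.Chars.len w : Int)
        (st.1 ++ [(w, st.2, st.2 + word_bytes)], st.2 + word_bytes + 1))
      (acc, pos)).1 = acc ++ pvTriples ws pos := by
  induction ws generalizing acc pos with
  | nil => simp [pvTriples]
  | cons w rest ih =>
    simp only [List.foldl_cons]
    rw [ih]
    simp [pvTriples]

-- token-level form of B's scan: one dict lookup per token
def pvTokB (offsets : PySem.Dict (List Char) Int) : List (List Char) → Int → Option (Int × Int)
  | [], _ => none
  | w :: rest, start =>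
    let clean := PySem.Chars.lower (PySem.Chars.stripChars w ".,;:!?'\"()".toList)
    match offsets.get? clean with
    | some off => some (start + off, start + (w.length : Int))
    | none => pvTokB offsets rest (start + (w.length : Int) + 1)

-- the three-branch test of A is exactly one lookup in B's dict
theorem pvLookup (t clean : List Char) :
    (((PySem.Dict.empty.insert t (0 : Int)).insert ("l'".toList ++ t) 2).insert
      ("d'".toList ++ t) 2).get? clean =
      (if clean == t then some 0
       else if PySem.Chars.startswith clean "l'".toList &&
               (PySem.Chars.slice clean (some 2) none == t) then some 2
       else if PySem.Chars.startswith clean "d'".toList &&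
               (PySem.Chars.slice clean (some 2) none == t) then some 2
       else none) := by
  have hsl : ∀ (cs : List Char), PySem.Chars.slice cs (some 2) none = cs.drop 2 := by
    intro cs; simp [pysem]
  by_cases h1 : clean = t
  · subst h1
    have n2 : clean ≠ "l'".toList ++ clean := by
      intro h; apply_fun List.length at h; simp at h; omega
    have n3 : clean ≠ "d'".toList ++ clean := by
      intro h; apply_fun List.length at h; simp at h; omega
    rw [PySem.Dict.get?_insert_of_ne _ _ n3, PySem.Dict.get?_insert_of_ne _ _ n2,
      PySem.Dict.get?_insert_self]
    simp
  · by_cases h2 : clean = "l'".toList ++ t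
    · subst h2
      have n3 : "l'".toList ++ t ≠ "d'".toList ++ t := by simp
      rw [PySem.Dict.get?_insert_of_ne _ _ n3, PySem.Dict.get?_insert_self]
      have hb : (PySem.Chars.startswith ("l'".toList ++ t) "l'".toList &&
          (PySem.Chars.slice ("l'".toList ++ t) (some 2) none == t)) = true := by
        rw [hsl]
        simp [PySem.Chars.startswith_iff]
      rw [if_neg (by simpa using h1), if_pos hb]
    · by_cases h3 : clean = "d'".toList ++ t
      · subst h3
        rw [PySem.Dict.get?_insert_self]
        have hne2 : (PySem.Chars.startswith ("d'".toList ++ t) "l'".toList &&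
            (PySem.Chars.slice ("d'".toList ++ t) (some 2) none == t)) = false := by
          simp [PySem.Chars.startswith, List.isPrefixOf]
        have hb : (PySem.Chars.startswith ("d'".toList ++ t) "d'".toList &&
            (PySem.Chars.slice ("d'".toList ++ t) (some 2) none == t)) = true := by
          rw [hsl]
          simp [PySem.Chars.startswith_iff]
        rw [if_neg (by simpa using h1), if_neg (by simpa using hne2), if_pos hb]
      · rw [PySem.Dict.get?_insert_of_ne _ _ h3, PySem.Dict.get?_insert_of_ne _ _ h2,
          PySem.Dict.get?_insert_of_ne _ _ h1, PySem.Dict.get?_empty]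
        have g2 : (PySem.Chars.startswith clean "l'".toList &&
            (PySem.Chars.slice clean (some 2) none == t)) = false := by
          rw [hsl]
          rw [Bool.eq_false_iff]
          simp only [ne_eq, Bool.and_eq_true, beq_iff_eq, PySem.Chars.startswith_iff, not_and]
          rintro ⟨u, rfl⟩ h
          have hu : u = t := by simpa using h
          exact h2 (by rw [hu])
        have g3 : (PySem.Chars.startswith clean "d'".toList &&
            (PySem.Chars.slice clean (some 2) none == t)) = false := by
          rw [hsl]
          rw [Bool.eq_false_iff]
          simp only [ne_eq, Bool.and_eq_true, beq_iff_eq, PySem.Chars.startswith_iff, not_and]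
          rintro ⟨u, rfl⟩ h
          have hu : u = t := by simpa using h
          exact h3 (by rw [hu])
        rw [if_neg (by simpa using h1), if_neg (by simpa using g2), if_neg (by simpa using g3)]

-- A's branch-chain scan over the triples equals B's token-level dict scan
theorem pvLoopA_eq_tok (t : List Char) (ws : List (List Char)) (pos : Int) :
    pvFindLoopA t (pvTriples ws pos) =
      pvTokB (((PySem.Dict.empty.insert t (0 : Int)).insert ("l'".toList ++ t) 2).insert
        ("d'".toList ++ t) 2) ws pos := by
  induction ws generalizing pos with
  | nil => rfl
  | cons w rest ih =>
    simp only [pvTriples, pvFindLoopA, pvTokB, pvLookup, PySem.Chars.len]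
    split_ifs with h1 h2 h3 <;> simp_all

-- the prepended buffer as a head modification
def pvConsHead (buf : List Char) : List (List Char) → List (List Char)
  | [] => [buf]
  | w :: ws => (buf ++ w) :: ws

-- B's character scanner computes the token-level scan over pvMySplit
theorem pvScan_eq_tok (offsets : PySem.Dict (List Char) Int) (s : List Char) :
    ∀ (start : Int) (buf : List Char),
    pvScanB offsets (s ++ [' ']) start (start + (buf.length : Int)) buf =
      pvTokB offsets (pvConsHead buf (pvMySplit s)) start := by
  induction s with
  | nil =>
    intro start buf
    rcases h : offsets.get?
        (PySem.Chars.lower (PySem.Chars.stripChars buf ".,;:!?'\"()".toList)) with _ | off <;>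
      simp [pvScanB, pvMySplit, pvConsHead, pvTokB]
  | cons c rest ih =>
    intro start buf
    by_cases hc : c = ' '
    · subst hc
      rcases h : offsets.get?
          (PySem.Chars.lower (PySem.Chars.stripChars buf ".,;:!?'\"()".toList)) with _ | off
      · have hrec := ih (start + (buf.length : Int) + 1) []
        simp only [List.length_nil, Int.natCast_zero, add_zero] at hrec
        simp only [List.cons_append, pvScanB,
          if_pos (by simp : ((' ' : Char) == ' ') = true), h]
        rw [hrec]
        simp only [pvMySplit, pvConsHead]
        cases hs : pvMySplit rest with
        | nil => exact absurd hs (pvMySplit_ne_nil rest)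
        | cons w ws =>
          have h' : offsets.get? (PySem.Chars.lower (PySem.Chars.stripChars buf ['.', ',', ';', ':', '!', '?', '\'', '\"', '(', ')'])) = none := h
          simp [pvTokB, h']
      · simp only [List.cons_append, pvScanB,
          if_pos (by simp : ((' ' : Char) == ' ') = true), h, pvMySplit,
          pvConsHead]
        simp only [if_true]
        have h' : offsets.get? (PySem.Chars.lower (PySem.Chars.stripChars buf ['.', ',', ';', ':', '!', '?', '\'', '\"', '(', ')'])) = some off := h
        simp [pvTokB, h']
    · have hrec := ih start (buf ++ [c])
      simp only [List.length_append, List.length_singleton] at hrec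
      cases hs : pvMySplit rest with
      | nil => exact absurd hs (pvMySplit_ne_nil rest)
      | cons w ws =>
        simp only [List.cons_append, pvScanB, if_neg (by simp [hc] : ¬ (c == ' ') = true)]
        rw [show start + (buf.length : Int) + 1 = start + ((buf.length + 1 : Nat) : Int) by
          push_cast; ring, hrec]
        simp [pvMySplit, hc, pvConsHead, hs, List.modifyHead]

-- ===== VERDICT (by name: the statement is the Claim_ definition above) =====
theorem find_word_in_sentence_py_spec : Claim_equal_find_word_in_sentence_py := by
  intro sentence target_word _
  unfold Spec_find_word_in_sentence_py find_word_in_sentence_py find_word_in_sentence_py_alt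
    pvSplitWordsA
  rw [pvFold_eq_triples, List.nil_append, pvSplitOn_space, pvLoopA_eq_tok]
  have h := pvScan_eq_tok
    (((PySem.Dict.empty.insert (PySem.Chars.lower target_word.toList) (0 : Int)).insert
      ("l'".toList ++ PySem.Chars.lower target_word.toList) 2).insert
      ("d'".toList ++ PySem.Chars.lower target_word.toList) 2)
    (PySem.Chars.lower sentence.toList) 0 []
  simp only [List.length_nil, Int.natCast_zero, add_zero] at h
  rw [h]
  cases hs : pvMySplit (PySem.Chars.lower sentence.toList) with
  | nil => exact absurd hs (pvMySplit_ne_nil _)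
  | cons w ws => simp [pvConsHead]
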